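-- pv_equiv track=rewrite | github.com/flotoria/nody | backend/utils.py | infer_default_extension
-- ===== SOURCE A (Python) =====
-- from typing import Dict, Any, List, Optional, Tuple
--
-- def infer_default_extension(project_spec: Dict[str, Any]) -> str:
--     """Guess a sensible default file extension based on the declared tech stack."""
--     stack = project_spec.get("technical_stack", {})
--     combined = " ".join([
--         stack.get("frontend", ""),
--         stack.get("backend", ""),
--         stack.get("api", ""),
--         stack.get("infrastructure", ""),
--     ]).lower()
--
--     if any(keyword in combined for keyword in ["python", "fastapi", "django", "flask"]):
--         return ".py"
--     if any(keyword in combined for keyword in ["typescript", "next", "react", "angular"]):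
--         return ".tsx"
--     if "javascript" in combined or "node" in combined or "express" in combined:
--         return ".js"
--     if "go" in combined:
--         return ".go"
--     if "java" in combined or "spring" in combined:
--         return ".java"
--     if "c#" in combined or "dotnet" in combined:
--         return ".cs"
--     if "swift" in combined:
--         return ".swift"
--     if "kotlin" in combined:
--         return ".kt"
--     return ".txt"
-- ===== SOURCE B (Python) =====
-- # Different traversal: one overwrite-fold over a flat (keyword, ext) priority list
-- # scanned in REVERSE priority order (last write wins), instead of A's ordered
-- # short-circuit chain of grouped if-branches.
-- _PAIRS = [
--     ("python", ".py"), ("fastapi", ".py"), ("django", ".py"), ("flask", ".py"),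
--     ("typescript", ".tsx"), ("next", ".tsx"), ("react", ".tsx"), ("angular", ".tsx"),
--     ("javascript", ".js"), ("node", ".js"), ("express", ".js"),
--     ("go", ".go"),
--     ("java", ".java"), ("spring", ".java"),
--     ("c#", ".cs"), ("dotnet", ".cs"),
--     ("swift", ".swift"),
--     ("kotlin", ".kt"),
-- ]
--
--
-- def infer_default_extension(project_spec):
--     """Guess a sensible default file extension based on the declared tech stack."""
--     stack = project_spec.get("technical_stack", {})
--     combined = " ".join(
--         stack.get(key, "") for key in ("frontend", "backend", "api", "infrastructure")
--     ).lower()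
--     ext = ".txt"
--     # walk from lowest to highest priority; every match overwrites, so the
--     # final value is the highest-priority matching keyword's extension
--     for keyword, candidate in reversed(_PAIRS):
--         if keyword in combined:
--             ext = candidate
--     return ext
-- ===== Notes on version B (the rewrite author's own statement) =====
-- stated objective: alternative
-- what changed: Replaced the ordered short-circuit chain of grouped if-branches by a single exhaustive overwrite-fold over a flat (keyword, extension) priority list traversed in reverse priority order, so the last write (the highest-priority match) wins.
import Mathlib
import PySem

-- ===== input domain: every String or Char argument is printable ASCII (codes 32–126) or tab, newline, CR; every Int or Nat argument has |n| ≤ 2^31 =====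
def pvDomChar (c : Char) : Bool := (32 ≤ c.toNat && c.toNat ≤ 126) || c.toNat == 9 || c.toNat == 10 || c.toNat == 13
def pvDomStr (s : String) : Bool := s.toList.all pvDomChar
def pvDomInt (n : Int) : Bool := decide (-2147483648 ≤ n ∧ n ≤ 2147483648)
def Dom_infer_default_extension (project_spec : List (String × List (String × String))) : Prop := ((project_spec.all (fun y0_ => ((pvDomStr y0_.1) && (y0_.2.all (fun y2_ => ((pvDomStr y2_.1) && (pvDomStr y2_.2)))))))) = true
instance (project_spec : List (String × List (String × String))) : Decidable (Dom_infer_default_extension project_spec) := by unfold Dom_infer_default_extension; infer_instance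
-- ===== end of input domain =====

-- B replaces A's short-circuit if-chain by a reverse-order overwrite-fold over a flat
-- (keyword, extension) priority list (last write wins); same return value, not faster.

-- ===== PORT A =====
def infer_default_extension (project_spec : List (String × List (String × String))) : String :=
  let stack := PySem.Dict.getD (PySem.Dict.mk project_spec) "technical_stack" []
  let stackD := PySem.Dict.mk stack
  let combined := PySem.Str.lower (PySem.Str.join " "
    [PySem.Dict.getD stackD "frontend" "",
     PySem.Dict.getD stackD "backend" "",
     PySem.Dict.getD stackD "api" "",
     PySem.Dict.getD stackD "infrastructure" ""])
  if ["python", "fastapi", "django", "flask"].any (fun k => PySem.Str.isIn k combined) then ".py"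
  else if ["typescript", "next", "react", "angular"].any (fun k => PySem.Str.isIn k combined) then ".tsx"
  else if PySem.Str.isIn "javascript" combined || PySem.Str.isIn "node" combined || PySem.Str.isIn "express" combined then ".js"
  else if PySem.Str.isIn "go" combined then ".go"
  else if PySem.Str.isIn "java" combined || PySem.Str.isIn "spring" combined then ".java"
  else if PySem.Str.isIn "c#" combined || PySem.Str.isIn "dotnet" combined then ".cs"
  else if PySem.Str.isIn "swift" combined then ".swift"
  else if PySem.Str.isIn "kotlin" combined then ".kt"
  else ".txt"

-- ===== PORT B =====
-- the flat priority list _PAIRS of Source B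
def pvPairs : List (String × String) :=
  [("python", ".py"), ("fastapi", ".py"), ("django", ".py"), ("flask", ".py"),
   ("typescript", ".tsx"), ("next", ".tsx"), ("react", ".tsx"), ("angular", ".tsx"),
   ("javascript", ".js"), ("node", ".js"), ("express", ".js"),
   ("go", ".go"),
   ("java", ".java"), ("spring", ".java"),
   ("c#", ".cs"), ("dotnet", ".cs"),
   ("swift", ".swift"),
   ("kotlin", ".kt")]

def infer_default_extension_alt (project_spec : List (String × List (String × String))) : String :=
  let stack := PySem.Dict.getD (PySem.Dict.mk project_spec) "technical_stack" []
  let stackD := PySem.Dict.mk stack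
  let combined := PySem.Str.lower (PySem.Str.join " "
    (["frontend", "backend", "api", "infrastructure"].map (fun key => PySem.Dict.getD stackD key "")))
  -- for keyword, candidate in reversed(_PAIRS): if keyword in combined: ext = candidate
  pvPairs.reverse.foldl
    (fun ext p => if PySem.Str.isIn p.1 combined then p.2 else ext) ".txt"

-- ===== PRECONDITION & SPEC =====
def Spec_infer_default_extension (project_spec : List (String × List (String × String))) (out : String) : Prop := out = infer_default_extension_alt project_spec
instance (project_spec : List (String × List (String × String))) (out : String) : Decidable (Spec_infer_default_extension project_spec out) := by unfold Spec_infer_default_extension; infer_instance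

-- ===== CLAIM (what is proved, stated in full; the proofs are below) =====
def Claim_equal_infer_default_extension : Prop := ∀ (project_spec : List (String × List (String × String))), Dom_infer_default_extension project_spec → Spec_infer_default_extension project_spec (infer_default_extension project_spec)

-- ===== LEMMAS AND PROOFS =====
-- merging two consecutive branches that return the same extension
theorem ite_ite_or (a b : Bool) (e r : String) :
    (if a = true then e else if b = true then e else r) = (if (a || b) = true then e else r) := by
  cases a <;> simp
-- For any combined string, B's reverse overwrite-fold over the flat priority list
-- equals A's if-chain: the last write during the reverse traversal is the
-- highest-priority matching keyword, i.e. the first branch that fires in A.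
theorem scan_eq_chain (c : String) :
    pvPairs.reverse.foldl (fun ext p => if PySem.Str.isIn p.1 c then p.2 else ext) ".txt" =
      (if ["python", "fastapi", "django", "flask"].any (fun k => PySem.Str.isIn k c) then ".py"
       else if ["typescript", "next", "react", "angular"].any (fun k => PySem.Str.isIn k c) then ".tsx"
       else if PySem.Str.isIn "javascript" c || PySem.Str.isIn "node" c || PySem.Str.isIn "express" c then ".js"
       else if PySem.Str.isIn "go" c then ".go"
       else if PySem.Str.isIn "java" c || PySem.Str.isIn "spring" c then ".java"
       else if PySem.Str.isIn "c#" c || PySem.Str.isIn "dotnet" c then ".cs"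
       else if PySem.Str.isIn "swift" c then ".swift"
       else if PySem.Str.isIn "kotlin" c then ".kt"
       else ".txt") := by
  rw [List.foldl_reverse]
  simp only [pvPairs, List.foldr_cons, List.foldr_nil, List.any_cons, List.any_nil,
    Bool.or_false, ite_ite_or, Bool.or_assoc]

-- ===== VERDICT (by name: the statement is the Claim_ definition above) =====
theorem infer_default_extension_spec : Claim_equal_infer_default_extension := by
  intro project_spec _
  unfold Spec_infer_default_extension infer_default_extension infer_default_extension_alt
  simp only [List.map]
  exact (scan_eq_chain _).symm
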